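-- pv_equiv track=rewrite | github.com/cirosantilli/project-euler-solvers | solvers/490.py | tensor_from_vec
-- ===== SOURCE A (Python) =====
-- def tensor_from_vec(v, mod):
--     """Return flattened 8x8x8 tensor for v⊗v⊗v (mod mod)."""
--     T = [0] * 512
--     vv = [x % mod for x in v]
--     for i in range(8):
--         vi = vv[i]
--         for j in range(8):
--             vij = (vi * vv[j]) % mod
--             base = i * 64 + j * 8
--             for k in range(8):
--                 T[base + k] = (vij * vv[k]) % mod
--     return T
-- ===== SOURCE B (Python) =====
-- def tensor_from_vec(v, mod):
--     """Return flattened 8x8x8 tensor for v⊗v⊗v (mod mod)."""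
--     vv = [x % mod for x in v]
--     w = [vv[i] for i in range(8)]
--
--     def kron(a, b):
--         return [(x * y) % mod for x in a for y in b]
--
--     def power(t, n):
--         return t if n == 1 else kron(power(t, n - 1), t)
--
--     return power(w, 3)
-- ===== Notes on version B (the rewrite author's own statement) =====
-- stated objective: alternative
-- what changed: A fills a preallocated 512-slot buffer with a hardcoded triple-nested index loop; B has no output buffer, no nested index loops and no 8x8x8 index arithmetic: it defines a generic modular Kronecker product kron(a,b) and builds the result by recursion on the tensor power, returning power(w, 3) = kron(kron(w,w),w) for w = first 8 reduced entries.
import Mathlib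
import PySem

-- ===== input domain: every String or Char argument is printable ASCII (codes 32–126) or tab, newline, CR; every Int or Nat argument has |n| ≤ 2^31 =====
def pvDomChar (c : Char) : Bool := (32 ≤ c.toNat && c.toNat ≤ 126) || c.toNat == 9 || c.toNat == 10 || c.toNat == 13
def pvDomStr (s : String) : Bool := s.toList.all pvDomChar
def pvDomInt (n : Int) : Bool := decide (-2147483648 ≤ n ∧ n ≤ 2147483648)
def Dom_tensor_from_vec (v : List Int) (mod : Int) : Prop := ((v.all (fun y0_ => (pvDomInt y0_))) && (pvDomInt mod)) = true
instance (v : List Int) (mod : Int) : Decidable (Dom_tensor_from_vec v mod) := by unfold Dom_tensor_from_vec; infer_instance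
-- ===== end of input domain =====

-- B replaces A's triple-nested in-place index loop over a preallocated 512-slot buffer by a
-- generic modular Kronecker product and recursion on the tensor power: power(vv[:8], 3)
-- (alternative decomposition, same cost).

-- ===== PORT A =====
-- 'T[base + k] = …' is ported as List.set at the index's toNat; under Pre_ the index is
-- always in range 0..511, where this is exact.
def tensor_from_vec (v : List Int) (mod : Int) : List Int :=
  let T : List Int := List.replicate 512 0
  let vv := v.map (fun x => PySem.Int.mod x mod)
  (PySem.List.pyRange 0 8 1).foldl (fun T i =>
    let vi := PySem.List.pyGetD vv i 0
    (PySem.List.pyRange 0 8 1).foldl (fun T j =>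
      let vij := PySem.Int.mod (vi * PySem.List.pyGetD vv j 0) mod
      let base := i * 64 + j * 8
      (PySem.List.pyRange 0 8 1).foldl (fun T k =>
        T.set (base + k).toNat (PySem.Int.mod (vij * PySem.List.pyGetD vv k 0) mod)) T) T) T

-- ===== PORT B =====
-- kron(a, b) = [(x * y) % mod for x in a for y in b]
def pvKron (mo : Int) (a b : List Int) : List Int :=
  a.flatMap (fun x => b.map (fun y => PySem.Int.mod (x * y) mo))

-- power(t, n) = t if n == 1 else kron(power(t, n - 1), t); only ever called with n = 3,
-- so the n = 0 equation (where Python would recurse forever) is an unreachable totality guard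
def pvPower (mo : Int) (t : List Int) : Nat → List Int
  | 0 => t
  | 1 => t
  | n + 2 => pvKron mo (pvPower mo t (n + 1)) t

def tensor_from_vec_alt (v : List Int) (mod : Int) : List Int :=
  let vv := v.map (fun x => PySem.Int.mod x mod)
  let w := (PySem.List.pyRange 0 8 1).map (fun i => PySem.List.pyGetD vv i 0)
  pvPower mod w 3

-- ===== PRECONDITION & SPEC =====
-- Pre_ excludes exactly the inputs where A raises: mod = 0 (ZeroDivisionError in the first
-- comprehension, or IndexError on empty v) and v shorter than 8 (IndexError on vv[i]).
def Pre_tensor_from_vec (v : List Int) (mod : Int) : Prop := mod ≠ 0 ∧ 8 ≤ v.length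
instance (v : List Int) (mod : Int) : Decidable (Pre_tensor_from_vec v mod) := by unfold Pre_tensor_from_vec; infer_instance

def pvWitness_tensor_from_vec : List Int × Int := ([1, 2, 3, 4, 5, 6, 7, 8], 5)

def Spec_tensor_from_vec (v : List Int) (mod : Int) (out : List Int) : Prop := out = tensor_from_vec_alt v mod
instance (v : List Int) (mod : Int) (out : List Int) : Decidable (Spec_tensor_from_vec v mod out) := by unfold Spec_tensor_from_vec; infer_instance

-- ===== CLAIM (what is proved, stated in full; the proofs are below) =====
def Claim_equal_tensor_from_vec : Prop := ∀ (v : List Int) (mod : Int), Dom_tensor_from_vec v mod → Pre_tensor_from_vec v mod → Spec_tensor_from_vec v mod (tensor_from_vec v mod)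

-- ===== LEMMAS AND PROOFS =====

-- the small literal range, renormalised to folds over List.range
theorem pv_range8 : PySem.List.pyRange 0 8 1 = (List.range 8).map (fun n : Nat => (n : Int)) := by decide

theorem pv_castidx (i j k : Nat) : ((i : Int) * 64 + (j : Int) * 8 + (k : Int)).toNat = i * 64 + j * 8 + k := by
  omega

theorem pv_flat_len (blk : Nat → List Int) (s : Nat) (hs : ∀ j, (blk j).length = s) :
    ∀ m, ((List.range m).flatMap blk).length = m * s := by
  intro m
  induction m with
  | zero => simp
  | succ n ih => simp [List.range_succ, List.flatMap_append, ih, hs]; ring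

-- one pass of consecutive block writes: folding a writer W that overwrites the s slots
-- starting at c + j*s with block blk j turns T into take c ++ (all blocks) ++ drop (c + m*s)
theorem pv_chunkRun (s c : Nat) (blk : Nat → List Int) (hs : ∀ j, (blk j).length = s)
    (W : List Int → Nat → List Int)
    (hW : ∀ (j : Nat) (T : List Int), c + j * s + s ≤ T.length →
      W T j = T.take (c + j * s) ++ blk j ++ T.drop (c + j * s + s)) :
    ∀ (m : Nat) (T : List Int), c + m * s ≤ T.length →
      (List.range m).foldl W T = T.take c ++ (List.range m).flatMap blk ++ T.drop (c + m * s) := by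
  intro m
  induction m with
  | zero => intro T h; simp
  | succ n ih =>
    intro T h
    have hmul : (n + 1) * s = n * s + s := by ring
    have hn : c + n * s ≤ T.length := by omega
    have hc : c ≤ T.length := by omega
    rw [List.range_succ, List.foldl_append, List.foldl_cons, List.foldl_nil, ih T hn]
    have hpre : (T.take c ++ (List.range n).flatMap blk).length = c + n * s := by
      simp [pv_flat_len blk s hs n]; omega
    rw [hW n _ (by simp only [List.length_append, pv_flat_len blk s hs n, List.length_take, List.length_drop]; omega)]
    rw [List.take_left' hpre]
    have hdrop : (T.take c ++ (List.range n).flatMap blk ++ T.drop (c + n * s)).drop (c + n * s + s)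
        = T.drop (c + (n + 1) * s) := by
      have h2 : c + n * s + s = (T.take c ++ (List.range n).flatMap blk).length + s := by omega
      rw [h2, List.drop_length_add_append, List.drop_drop]
      congr 1
      omega
    rw [hdrop]
    simp [List.flatMap_append, List.append_assoc]

-- specialisation to single writes (s = 1)
theorem pv_innerRun (h : Nat → Int) (c : Nat) (m : Nat) (T : List Int) (hT : c + m ≤ T.length) :
    (List.range m).foldl (fun T k => T.set (c + k) (h k)) T
      = T.take c ++ (List.range m).map h ++ T.drop (c + m) := by
  have step := pv_chunkRun 1 c (fun k => [h k]) (fun _ => rfl)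
    (fun T k => T.set (c + k) (h k))
    (fun j T hj => by
      have hlt : c + j < T.length := by omega
      show T.set (c + j) (h j) = List.take (c + j * 1) T ++ [h j] ++ List.drop (c + j * 1 + 1) T
      rw [List.set_eq_take_cons_drop _ hlt]
      simp) m T (by omega)
  rw [step, ← List.map_eq_flatMap]
  congr 2
  omega

-- specialisation to rows of 8 single writes (s = 8)
theorem pv_midRun (F : Nat → Nat → Int) (c : Nat) (m : Nat) (T : List Int) (hT : c + m * 8 ≤ T.length) :
    (List.range m).foldl (fun T j => (List.range 8).foldl (fun T k => T.set (c + j * 8 + k) (F j k)) T) T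
      = T.take c ++ (List.range m).flatMap (fun j => (List.range 8).map (F j)) ++ T.drop (c + m * 8) := by
  exact pv_chunkRun 8 c (fun j => (List.range 8).map (F j)) (fun _ => by simp)
    (fun T j => (List.range 8).foldl (fun T k => T.set (c + j * 8 + k) (F j k)) T)
    (fun j T hj => pv_innerRun (F j) (c + j * 8) 8 T (by omega)) m T hT

-- the whole of A's write loop over the fresh 512 buffer is the flattened tensor
set_option maxRecDepth 4096 in
theorem pv_outRun (G : Nat → Nat → Nat → Int) :
    (List.range 8).foldl (fun T i => (List.range 8).foldl (fun T j =>
        (List.range 8).foldl (fun T k => T.set (i * 64 + j * 8 + k) (G i j k)) T) T)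
      (List.replicate 512 (0 : Int))
      = (List.range 8).flatMap (fun i => (List.range 8).flatMap (fun j => (List.range 8).map (G i j))) := by
  have step := pv_chunkRun 64 0 (fun i => (List.range 8).flatMap (fun j => (List.range 8).map (G i j)))
    (fun i => by simp)
    (fun T i => (List.range 8).foldl (fun T j =>
        (List.range 8).foldl (fun T k => T.set (i * 64 + j * 8 + k) (G i j k)) T) T)
    (fun i T hi => by
      have hmid := pv_midRun (G i) (i * 64) 8 T (by omega)
      simpa using hmid)
    8 (List.replicate 512 (0 : Int)) (by simp)
  rw [step]
  simp

-- recursion unrolled at the call's literal depth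
theorem pv_power3 (mo : Int) (t : List Int) : pvPower mo t 3 = pvKron mo (pvKron mo t t) t := rfl

-- ===== VERDICT (by name: the statement is the Claim_ definition above) =====
theorem tensor_from_vec_spec : Claim_equal_tensor_from_vec := by
  intro v mod _ hpre
  obtain ⟨hmod, hlen⟩ := hpre
  show tensor_from_vec v mod = tensor_from_vec_alt v mod
  simp only [tensor_from_vec, tensor_from_vec_alt]
  rw [pv_range8]
  simp only [List.foldl_map, List.map_map, Function.comp_def, pv_castidx]
  rw [pv_outRun]
  rw [pv_power3]
  simp only [pvKron, List.flatMap_map, List.map_map, Function.comp_def, List.flatMap_assoc]
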